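-- pv_equiv track=rewrite | github.com/MrHamdulay/csc3-capstone | examples/data/Assignment_4/srkmoh002/ndom.py | decimal_to_ndom
-- ===== SOURCE A (Python) =====
-- def decimal_to_ndom(a):
--     d=a
--     ndom=0
--     i=0
--     while d!=0:
--         ndom=ndom+((d%6)*(10**i))
--         i=i+1
--         d=d//6
--     ndom=int(ndom)
--     return ndom
-- ===== SOURCE B (Python) =====
-- def decimal_to_ndom(a):
--     if a == 0:
--         return 0
--     ds = []
--     d = a
--     while d != 0:
--         ds.append(d % 6)
--         d //= 6
--     return int(''.join(str(x) for x in reversed(ds)))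
-- ===== Notes on version B (the rewrite author's own statement) =====
-- stated objective: alternative
-- what changed: Replaces the in-loop arithmetic accumulation ndom += (d%6)*10**i with a two-phase approach: collect the base-6 digits into a list, then reverse, stringify and parse once.
import Mathlib
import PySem

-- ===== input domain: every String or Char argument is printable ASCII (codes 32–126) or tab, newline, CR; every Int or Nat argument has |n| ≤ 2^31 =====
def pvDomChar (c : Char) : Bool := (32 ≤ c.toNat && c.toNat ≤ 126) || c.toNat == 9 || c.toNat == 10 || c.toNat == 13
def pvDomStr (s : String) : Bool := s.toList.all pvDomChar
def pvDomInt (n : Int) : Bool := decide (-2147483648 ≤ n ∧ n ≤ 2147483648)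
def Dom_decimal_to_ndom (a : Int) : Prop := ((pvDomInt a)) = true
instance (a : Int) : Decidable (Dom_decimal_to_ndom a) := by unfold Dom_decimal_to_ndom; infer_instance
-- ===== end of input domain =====

-- ===== PORT A =====
-- B collects the base-6 digits into a list then assembles them once, instead of A's
-- in-loop accumulation ndom += (d%6)*10**i (objective: alternative decomposition).
-- Python A loops forever for a < 0, so Pre_ restricts to 0 ≤ a; on that domain
-- d % 6 / d // 6 coincide with Nat % and /, so the loop is ported over Nat.
def pvALoop (d ndom i : Nat) : Nat :=
  if d = 0 then ndom else pvALoop (d / 6) (ndom + (d % 6) * 10 ^ i) (i + 1)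
termination_by d
decreasing_by exact Nat.div_lt_self (Nat.pos_of_ne_zero (by assumption)) (by norm_num)

def decimal_to_ndom (a : Int) : Int := (pvALoop a.toNat 0 0 : Int)

-- ===== PORT B =====
-- base-6 digits, least-significant first (Source B's while loop appending d % 6)
def pvDigits (d : Nat) : List Nat :=
  if d = 0 then [] else d % 6 :: pvDigits (d / 6)
termination_by d
decreasing_by exact Nat.div_lt_self (Nat.pos_of_ne_zero (by assumption)) (by norm_num)

-- int(''.join(str(x) for x in reversed(ds))): each digit is 0..5, so joining the
-- digit characters and parsing back is exactly the base-10 fold over the reversed list.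
def decimal_to_ndom_alt (a : Int) : Int :=
  if a = 0 then 0
  else (((pvDigits a.toNat).reverse.foldl (fun acc x => acc * 10 + x) 0 : Nat) : Int)

-- ===== PRECONDITION & SPEC =====
-- Python A (and B) never terminates for a < 0 (d //= 6 stalls at -1), so only 0 ≤ a is claimed.
def Pre_decimal_to_ndom (a : Int) : Prop := 0 ≤ a
instance (a : Int) : Decidable (Pre_decimal_to_ndom a) := by unfold Pre_decimal_to_ndom; infer_instance
def pvWitness_decimal_to_ndom : Int := 37
def Spec_decimal_to_ndom (a : Int) (out : Int) : Prop := out = decimal_to_ndom_alt a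
instance (a : Int) (out : Int) : Decidable (Spec_decimal_to_ndom a out) := by unfold Spec_decimal_to_ndom; infer_instance

-- ===== CLAIM (what is proved, stated in full; the proofs are below) =====
def Claim_equal_decimal_to_ndom : Prop := ∀ (a : Int), Dom_decimal_to_ndom a → Pre_decimal_to_ndom a → Spec_decimal_to_ndom a (decimal_to_ndom a)

-- ===== LEMMAS AND PROOFS =====
-- B's assembled value, written as a foldr via List.foldl_reverse
def pvN (d : Nat) : Nat := (pvDigits d).foldr (fun x acc => acc * 10 + x) 0

theorem pvN_eq_foldl (d : Nat) :
    ((pvDigits d).reverse.foldl (fun acc x => acc * 10 + x) 0) = pvN d := by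
  rw [List.foldl_reverse]; rfl

theorem pvN_rec (d : Nat) : pvN d = if d = 0 then 0 else d % 6 + 10 * pvN (d / 6) := by
  unfold pvN
  rw [pvDigits]
  split_ifs with h
  · simp
  · simp [Nat.add_comm, Nat.mul_comm]

theorem pvALoop_eq (d : Nat) : ∀ ndom i, pvALoop d ndom i = ndom + 10 ^ i * pvN d := by
  induction d using Nat.strong_induction_on with
  | _ d ih =>
    intro ndom i
    rw [pvALoop, pvN_rec]
    split_ifs with h
    · simp
    · rw [ih (d / 6) (Nat.div_lt_self (Nat.pos_of_ne_zero h) (by norm_num)) _ (i + 1)]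
      ring

-- ===== VERDICT (by name: the statement is the Claim_ definition above) =====
theorem decimal_to_ndom_spec : Claim_equal_decimal_to_ndom := by
  intro a _ hpre
  unfold Spec_decimal_to_ndom decimal_to_ndom decimal_to_ndom_alt
  by_cases h : a = 0
  · subst h; simp [pvALoop]
  · rw [if_neg h, pvN_eq_foldl, pvALoop_eq]
    simp
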